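-- pv_equiv track=rewrite | github.com/cirosantilli/project-euler-solvers | solvers/223.py | solve
-- ===== SOURCE A (Python) =====
-- from typing import List, Tuple
--
-- LIMIT = 25_000_000
--
-- def solve(limit: int = LIMIT) -> int:
--     """
--     Returns the number of (a,b,c) with a<=b<=c, a^2+b^2=c^2+1 and a+b+c<=limit.
--     """
--     # Two root solutions generate two disjoint parity classes.
--     stack: List[Tuple[int, int, int]] = [(1, 1, 1), (1, 2, 2)]
--     count = 0
--
--     # Local bindings for speed
--     lim = limit
--     append = stack.append
--     pop = stack.pop
--
--     while stack:
--         a, b, c = pop()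
--         if a + b + c > lim:
--             continue
--         count += 1
--
--         # Child via matrix A:
--         x = a - 2 * b + 2 * c
--         y = 2 * a - b + 2 * c
--         z = 2 * a - 2 * b + 3 * c
--         if x > y:
--             x, y = y, x
--         if x + y + z <= lim:
--             append((x, y, z))
--
--         # Child via matrix B:
--         x = a + 2 * b + 2 * c
--         y = 2 * a + b + 2 * c
--         z = 2 * a + 2 * b + 3 * c
--         if x > y:
--             x, y = y, x
--         if x + y + z <= lim:
--             append((x, y, z))
--
--         # Child via matrix C:
--         # For isosceles nodes (a==b), the C-child is a duplicate of the A-child after swapping x/y.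
--         if a != b:
--             x = -a + 2 * b + 2 * c
--             y = -2 * a + b + 2 * c
--             z = -2 * a + 2 * b + 3 * c
--             if x > y:
--                 x, y = y, x
--             if x + y + z <= lim:
--                 append((x, y, z))
--
--     return count
-- ===== SOURCE B (Python) =====
-- from typing import List, Tuple
--
-- LIMIT = 25_000_000
--
-- def solve(limit: int = LIMIT) -> int:
--     """
--     Returns the number of (a,b,c) with a<=b<=c, a^2+b^2=c^2+1 and a+b+c<=limit.
--     """
--     # Breadth-first, level by level: count whole generations at once.
--     frontier: List[Tuple[int, int, int]] = [t for t in ((1, 1, 1), (1, 2, 2))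
--                                             if t[0] + t[1] + t[2] <= limit]
--     count = 0
--     while frontier:
--         count += len(frontier)
--         nxt: List[Tuple[int, int, int]] = []
--         append = nxt.append
--         for a, b, c in frontier:
--             x = a - 2*b + 2*c; y = 2*a - b + 2*c; z = 2*a - 2*b + 3*c
--             if x + y + z <= limit:
--                 append((x, y, z) if x <= y else (y, x, z))
--             x = a + 2*b + 2*c; y = 2*a + b + 2*c; z = 2*a + 2*b + 3*c
--             if x + y + z <= limit:
--                 append((x, y, z) if x <= y else (y, x, z))
--             if a != b:
--                 x = -a + 2*b + 2*c; y = -2*a + b + 2*c; z = -2*a + 2*b + 3*c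
--                 if x + y + z <= limit:
--                     append((x, y, z) if x <= y else (y, x, z))
--         frontier = nxt
--     return count
-- ===== Notes on version B (the rewrite author's own statement) =====
-- stated objective: alternative
-- what changed: Replaced the explicit-stack depth-first loop (pop one node, count it, push qualifying children) by a breadth-first level-by-level traversal that counts whole generations at once with len(frontier) and builds the next generation in a single pass, ordering each child with a conditional expression instead of an in-place swap.
import Mathlib
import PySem

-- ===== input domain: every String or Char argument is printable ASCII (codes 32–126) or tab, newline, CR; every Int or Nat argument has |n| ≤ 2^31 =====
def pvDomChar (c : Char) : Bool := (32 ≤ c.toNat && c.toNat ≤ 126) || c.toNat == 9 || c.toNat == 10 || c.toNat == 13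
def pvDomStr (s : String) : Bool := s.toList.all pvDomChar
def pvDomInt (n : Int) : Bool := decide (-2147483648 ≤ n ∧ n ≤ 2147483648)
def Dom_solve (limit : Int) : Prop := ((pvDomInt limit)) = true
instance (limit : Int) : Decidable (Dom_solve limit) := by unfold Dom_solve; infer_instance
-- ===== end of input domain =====

-- B replaces A's explicit-stack depth-first loop by a breadth-first, level-by-level traversal
-- with a children-generator helper (objective: alternative decomposition, same cost).
-- Both loop ports use a fuel parameter as a totality device; the proofs below show the fuel
-- (one unit per loop iteration, bounded by the measure Σ 4^(lim+1-perimeter)) never runs out.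

-- ===== PORT A =====
def pvW (lim : Int) (t : Int × Int × Int) : Nat := 4 ^ ((lim + 1 - (t.1 + t.2.1 + t.2.2)).toNat)

def pvMeasure (lim : Int) (s : List (Int × Int × Int)) : Nat := (s.map (pvW lim)).sum

-- the conditional push 'if x + y + z <= lim: append((x, y, z))' (stack top = list head)
def pvPush (lim : Int) (p : Int × Int × Int) (s : List (Int × Int × Int)) : List (Int × Int × Int) :=
  if p.1 + p.2.1 + p.2.2 ≤ lim then p :: s else s

-- 'compute x,y,z via matrix A/B/C; if x > y: swap'
def pvSwapA (a b c : Int) : Int × Int × Int :=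
  if a - 2*b + 2*c > 2*a - b + 2*c then (2*a - b + 2*c, a - 2*b + 2*c, 2*a - 2*b + 3*c)
  else (a - 2*b + 2*c, 2*a - b + 2*c, 2*a - 2*b + 3*c)

def pvSwapB (a b c : Int) : Int × Int × Int :=
  if a + 2*b + 2*c > 2*a + b + 2*c then (2*a + b + 2*c, a + 2*b + 2*c, 2*a + 2*b + 3*c)
  else (a + 2*b + 2*c, 2*a + b + 2*c, 2*a + 2*b + 3*c)

def pvSwapC (a b c : Int) : Int × Int × Int :=
  if -a + 2*b + 2*c > -2*a + b + 2*c then (-2*a + b + 2*c, -a + 2*b + 2*c, -2*a + 2*b + 3*c)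
  else (-a + 2*b + 2*c, -2*a + b + 2*c, -2*a + 2*b + 3*c)

-- the while-loop of A (stack top = list head; pops from the head); fuel only makes it total
def solveLoop (lim : Int) : Nat → List (Int × Int × Int) → Int → Int
  | 0, _, count => count
  | _ + 1, [], count => count
  | fuel + 1, (a, b, c) :: rest, count =>
    if a + b + c > lim then solveLoop lim fuel rest count
    else
      solveLoop lim fuel
        (if a ≠ b then
          pvPush lim (pvSwapC a b c) (pvPush lim (pvSwapB a b c) (pvPush lim (pvSwapA a b c) rest))
        else pvPush lim (pvSwapB a b c) (pvPush lim (pvSwapA a b c) rest))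
        (count + 1)

def solve (limit : Int) : Int :=
  solveLoop limit (pvMeasure limit [(1, 2, 2), (1, 1, 1)] + 1) [(1, 2, 2), (1, 1, 1)] 0

-- ===== PORT B =====
-- the body of Source B's 'for a, b, c in frontier' loop: appends t's qualifying ordered children to acc
def pvStep (lim : Int) (acc : List (Int × Int × Int)) (t : Int × Int × Int) :
    List (Int × Int × Int) :=
  match t with
  | (a, b, c) =>
    let acc1 :=
      let x := a - 2*b + 2*c; let y := 2*a - b + 2*c; let z := 2*a - 2*b + 3*c
      if x + y + z ≤ lim then acc ++ [if x ≤ y then (x, y, z) else (y, x, z)] else acc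
    let acc2 :=
      let x := a + 2*b + 2*c; let y := 2*a + b + 2*c; let z := 2*a + 2*b + 3*c
      if x + y + z ≤ lim then acc1 ++ [if x ≤ y then (x, y, z) else (y, x, z)] else acc1
    if a ≠ b then
      let x := -a + 2*b + 2*c; let y := -2*a + b + 2*c; let z := -2*a + 2*b + 3*c
      if x + y + z ≤ lim then acc2 ++ [if x ≤ y then (x, y, z) else (y, x, z)] else acc2
    else acc2

-- the while-loop of Source B's solve; fuel only makes it total
def bfsLoop (lim : Int) : Nat → List (Int × Int × Int) → Int → Int
  | 0, _, count => count
  | fuel + 1, frontier, count =>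
    if frontier = [] then count
    else
      bfsLoop lim fuel (frontier.foldl (pvStep lim) []) (count + (frontier.length : Int))

def solve_alt (limit : Int) : Int :=
  let frontier := [(1, 1, 1), (1, 2, 2)].filter fun t => t.1 + t.2.1 + t.2.2 ≤ limit
  bfsLoop limit (pvMeasure limit frontier + 1) frontier 0

-- ===== PRECONDITION & SPEC =====
def Spec_solve (limit : Int) (out : Int) : Prop := out = solve_alt limit
instance (limit : Int) (out : Int) : Decidable (Spec_solve limit out) := by unfold Spec_solve; infer_instance

-- ===== CLAIM (what is proved, stated in full; the proofs are below) =====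
def Claim_equal_solve : Prop := ∀ (limit : Int), Dom_solve limit → Spec_solve limit (solve limit)

-- ===== LEMMAS AND PROOFS =====

-- the invariant 1 ≤ a ≤ b ≤ c of every triple the loops ever see
def Inv_solve (t : Int × Int × Int) : Prop := 1 ≤ t.1 ∧ t.1 ≤ t.2.1 ∧ t.2.1 ≤ t.2.2

lemma pv_inv_mk {a b c : Int} : Inv_solve (a, b, c) ↔ 1 ≤ a ∧ a ≤ b ∧ b ≤ c := by
  simp [Inv_solve]

lemma pv_invA {a b c : Int} (h : Inv_solve (a, b, c)) : Inv_solve (pvSwapA a b c) := by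
  obtain ⟨h1, h2, h3⟩ := pv_inv_mk.mp h
  unfold pvSwapA; split <;> exact pv_inv_mk.mpr ⟨by omega, by omega, by omega⟩

lemma pv_invB {a b c : Int} (h : Inv_solve (a, b, c)) : Inv_solve (pvSwapB a b c) := by
  obtain ⟨h1, h2, h3⟩ := pv_inv_mk.mp h
  unfold pvSwapB; split <;> exact pv_inv_mk.mpr ⟨by omega, by omega, by omega⟩

lemma pv_invC {a b c : Int} (h : Inv_solve (a, b, c)) : Inv_solve (pvSwapC a b c) := by
  obtain ⟨h1, h2, h3⟩ := pv_inv_mk.mp h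
  unfold pvSwapC; split <;> exact pv_inv_mk.mpr ⟨by omega, by omega, by omega⟩

lemma pv_sumA (a b c : Int) :
    (pvSwapA a b c).1 + (pvSwapA a b c).2.1 + (pvSwapA a b c).2.2 = 5*a - 5*b + 7*c := by
  unfold pvSwapA; split <;> simp <;> ring

lemma pv_sumB (a b c : Int) :
    (pvSwapB a b c).1 + (pvSwapB a b c).2.1 + (pvSwapB a b c).2.2 = 5*a + 5*b + 7*c := by
  unfold pvSwapB; split <;> simp <;> ring

lemma pv_sumC (a b c : Int) :
    (pvSwapC a b c).1 + (pvSwapC a b c).2.1 + (pvSwapC a b c).2.2 = -5*a + 5*b + 7*c := by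
  unfold pvSwapC; split <;> simp <;> ring

lemma pvPush_inv {lim : Int} {p : Int × Int × Int} {s : List (Int × Int × Int)}
    (hp : Inv_solve p) (hs : ∀ t ∈ s, Inv_solve t) : ∀ t ∈ pvPush lim p s, Inv_solve t := by
  intro t ht
  unfold pvPush at ht
  split at ht
  · rcases List.mem_cons.mp ht with h | h
    · exact h ▸ hp
    · exact hs t h
  · exact hs t ht

lemma pvMeasure_cons (lim : Int) (t : Int × Int × Int) (s : List (Int × Int × Int)) :
    pvMeasure lim (t :: s) = pvW lim t + pvMeasure lim s := by simp [pvMeasure]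

lemma pvW_pos (lim : Int) (t : Int × Int × Int) : 0 < pvW lim t := Nat.pow_pos (by norm_num)

lemma pvMeasure_push_le (lim : Int) (p : Int × Int × Int) (s : List (Int × Int × Int)) (w : Nat)
    (h : p.1 + p.2.1 + p.2.2 ≤ lim → pvW lim p ≤ w) :
    pvMeasure lim (pvPush lim p s) ≤ w + pvMeasure lim s := by
  unfold pvPush
  split
  · rw [pvMeasure_cons]; have := h (by assumption); omega
  · omega

lemma pv_three_lt (k : Nat) (hk : 1 ≤ k) : 3 * 4 ^ (k - 4) < 4 ^ k := by
  have h1 : (4:Nat) ^ (k - 4) ≤ 4 ^ (k - 1) := Nat.pow_le_pow_right (by norm_num) (by omega)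
  have h2 : (4:Nat) ^ k = 4 * 4 ^ (k - 1) := by
    conv_lhs => rw [show k = (k - 1) + 1 by omega]
    rw [pow_succ]; ring
  have h3 : 0 < (4:Nat) ^ (k - 1) := Nat.pow_pos (by norm_num)
  omega

lemma pvW_child_le {lim : Int} {p : Int × Int × Int} {s : Int}
    (hs : s ≤ lim) (hps : p.1 + p.2.1 + p.2.2 ≤ lim) (hgrow : s + 4 ≤ p.1 + p.2.1 + p.2.2) :
    pvW lim p ≤ 4 ^ ((lim + 1 - s).toNat - 4) := by
  unfold pvW
  exact Nat.pow_le_pow_right (by norm_num) (by omega)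

lemma pv_step_lt (lim a b c : Int) (rest : List (Int × Int × Int))
    (h : Inv_solve (a, b, c)) (hle : a + b + c ≤ lim) :
    pvMeasure lim
      (if a ≠ b then pvPush lim (pvSwapC a b c) (pvPush lim (pvSwapB a b c) (pvPush lim (pvSwapA a b c) rest))
       else pvPush lim (pvSwapB a b c) (pvPush lim (pvSwapA a b c) rest)) <
      pvMeasure lim ((a, b, c) :: rest) := by
  obtain ⟨h1, h2, h3⟩ := pv_inv_mk.mp h
  have hkp : (1:Nat) ≤ (lim + 1 - (a + b + c)).toNat := by omega
  have hA : pvMeasure lim (pvPush lim (pvSwapA a b c) rest) ≤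
      4 ^ ((lim + 1 - (a + b + c)).toNat - 4) + pvMeasure lim rest :=
    pvMeasure_push_le _ _ _ _ (fun hp => pvW_child_le hle hp (by have := pv_sumA a b c; omega))
  have hB : pvMeasure lim (pvPush lim (pvSwapB a b c) (pvPush lim (pvSwapA a b c) rest)) ≤
      4 ^ ((lim + 1 - (a + b + c)).toNat - 4) + pvMeasure lim (pvPush lim (pvSwapA a b c) rest) :=
    pvMeasure_push_le _ _ _ _ (fun hp => pvW_child_le hle hp (by have := pv_sumB a b c; omega))
  have hC : pvMeasure lim (pvPush lim (pvSwapC a b c) (pvPush lim (pvSwapB a b c) (pvPush lim (pvSwapA a b c) rest))) ≤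
      4 ^ ((lim + 1 - (a + b + c)).toNat - 4) + pvMeasure lim (pvPush lim (pvSwapB a b c) (pvPush lim (pvSwapA a b c) rest)) :=
    pvMeasure_push_le _ _ _ _ (fun hp => pvW_child_le hle hp (by have := pv_sumC a b c; omega))
  have h3lt := pv_three_lt _ hkp
  have hW : pvW lim (a, b, c) = 4 ^ (lim + 1 - (a + b + c)).toNat := rfl
  rw [pvMeasure_cons]
  split <;> omega

-- the filtered ordered-children list pvStep appends (proof-side characterisation)
def pvKids (t : Int × Int × Int) : List (Int × Int × Int) :=
  match t with
  | (a, b, c) =>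
    [(min (a - 2*b + 2*c) (2*a - b + 2*c), max (a - 2*b + 2*c) (2*a - b + 2*c), 2*a - 2*b + 3*c),
     (min (a + 2*b + 2*c) (2*a + b + 2*c), max (a + 2*b + 2*c) (2*a + b + 2*c), 2*a + 2*b + 3*c)] ++
    (if a ≠ b then
       [(min (-a + 2*b + 2*c) (-2*a + b + 2*c), max (-a + 2*b + 2*c) (-2*a + b + 2*c), -2*a + 2*b + 3*c)]
     else [])

lemma pv_cond_eq_minmax (x y z : Int) :
    (if x ≤ y then (x, y, z) else (y, x, z)) = (min x y, max x y, z) := by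
  by_cases h : x ≤ y
  · rw [if_pos h, min_eq_left h, max_eq_right h]
  · rw [if_neg h, min_eq_right (by omega), max_eq_left (by omega)]

lemma pv_append_one (lim x y z : Int) (acc : List (Int × Int × Int)) :
    (if x + y + z ≤ lim then acc ++ [if x ≤ y then (x, y, z) else (y, x, z)] else acc) =
      acc ++ List.filter (fun k => decide (k.1 + k.2.1 + k.2.2 ≤ lim)) [(min x y, max x y, z)] := by
  have hmm : min x y + max x y + z = x + y + z := by rw [min_add_max]
  by_cases h : x + y + z ≤ lim
  · rw [if_pos h, pv_cond_eq_minmax]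
    simp [List.filter_cons, hmm, h]
  · rw [if_neg h]
    simp [List.filter_cons, hmm, h]

lemma pvStep_eq (lim : Int) (acc : List (Int × Int × Int)) (t : Int × Int × Int) :
    pvStep lim acc t = acc ++ (pvKids t).filter fun k => k.1 + k.2.1 + k.2.2 ≤ lim := by
  obtain ⟨a, b, c⟩ := t
  unfold pvStep
  dsimp only
  rw [pv_append_one, pv_append_one, pv_append_one]
  by_cases hab : a = b <;>
    simp [pvKids, hab, List.filter_append, List.filter_cons, List.append_assoc] <;>
    split_ifs <;> simp

lemma pv_foldl_step (lim : Int) (l acc : List (Int × Int × Int)) :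
    l.foldl (pvStep lim) acc =
      acc ++ l.flatMap fun t => (pvKids t).filter fun k => k.1 + k.2.1 + k.2.2 ≤ lim := by
  induction l generalizing acc with
  | nil => simp
  | cons t l' ih => simp [List.foldl_cons, pvStep_eq, List.flatMap_cons, ih]

lemma pvKids_inv {t u : Int × Int × Int} (ht : Inv_solve t) (hu : u ∈ pvKids t) : Inv_solve u := by
  obtain ⟨a, b, c⟩ := t
  obtain ⟨h1, h2, h3⟩ := pv_inv_mk.mp ht
  have inv3 : ∀ x y z : Int, 1 ≤ x → 1 ≤ y → x ≤ z → y ≤ z → Inv_solve (min x y, max x y, z) :=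
    fun x y z hx hy hxz hyz => pv_inv_mk.mpr ⟨le_min hx hy, min_le_max, max_le hxz hyz⟩
  unfold pvKids at hu
  rcases List.mem_append.mp hu with h | h
  · rcases List.mem_cons.mp h with h' | h'
    · exact h' ▸ inv3 _ _ _ (by omega) (by omega) (by omega) (by omega)
    · rcases List.mem_cons.mp h' with h'' | h''
      · exact h'' ▸ inv3 _ _ _ (by omega) (by omega) (by omega) (by omega)
      · cases h''
  · split at h
    · rcases List.mem_cons.mp h with h' | h'
      · exact h' ▸ inv3 _ _ _ (by omega) (by omega) (by omega) (by omega)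
      · cases h'
    · cases h

lemma pvKids_sum_ge {t u : Int × Int × Int} (ht : Inv_solve t) (hu : u ∈ pvKids t) :
    t.1 + t.2.1 + t.2.2 + 4 ≤ u.1 + u.2.1 + u.2.2 := by
  obtain ⟨a, b, c⟩ := t
  obtain ⟨h1, h2, h3⟩ := pv_inv_mk.mp ht
  have mm : ∀ x y : Int, min x y + max x y = x + y := fun x y => min_add_max x y
  unfold pvKids at hu
  rcases List.mem_append.mp hu with h | h
  · rcases List.mem_cons.mp h with h' | h'
    · subst h'; have := mm (a - 2*b + 2*c) (2*a - b + 2*c); dsimp only; omega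
    · rcases List.mem_cons.mp h' with h'' | h''
      · subst h''; have := mm (a + 2*b + 2*c) (2*a + b + 2*c); dsimp only; omega
      · cases h''
  · split at h
    · rcases List.mem_cons.mp h with h' | h'
      · subst h'; have := mm (-a + 2*b + 2*c) (-2*a + b + 2*c); dsimp only; omega
      · cases h'
    · cases h

lemma pvKids_length_le (t : Int × Int × Int) : (pvKids t).length ≤ 3 := by
  obtain ⟨a, b, c⟩ := t
  by_cases hab : a = b <;> simp [pvKids, hab]

lemma pv_kidmeasure_lt {lim : Int} {t : Int × Int × Int}
    (ht : Inv_solve t) (hle : t.1 + t.2.1 + t.2.2 ≤ lim) :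
    pvMeasure lim ((pvKids t).filter fun k => k.1 + k.2.1 + k.2.2 ≤ lim) < pvW lim t := by
  have hkp : (1:Nat) ≤ (lim + 1 - (t.1 + t.2.1 + t.2.2)).toNat := by omega
  have hbound : ∀ u ∈ (pvKids t).filter fun k => k.1 + k.2.1 + k.2.2 ≤ lim,
      pvW lim u ≤ 4 ^ ((lim + 1 - (t.1 + t.2.1 + t.2.2)).toNat - 4) := by
    intro u hu
    have h1 := List.mem_filter.mp hu
    have h2 : u.1 + u.2.1 + u.2.2 ≤ lim := by simpa using h1.2
    exact pvW_child_le hle h2 (pvKids_sum_ge ht h1.1)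
  have hlen : ((pvKids t).filter fun k => k.1 + k.2.1 + k.2.2 ≤ lim).length ≤ 3 :=
    le_trans (List.length_filter_le _ _) (pvKids_length_le t)
  have hsum : pvMeasure lim ((pvKids t).filter fun k => k.1 + k.2.1 + k.2.2 ≤ lim) ≤
      ((pvKids t).filter fun k => k.1 + k.2.1 + k.2.2 ≤ lim).length *
        4 ^ ((lim + 1 - (t.1 + t.2.1 + t.2.2)).toNat - 4) := by
    unfold pvMeasure
    have := List.sum_le_card_nsmul
      (((pvKids t).filter fun k => k.1 + k.2.1 + k.2.2 ≤ lim).map (pvW lim))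
      (4 ^ ((lim + 1 - (t.1 + t.2.1 + t.2.2)).toNat - 4))
      (by intro x hx; rcases List.mem_map.mp hx with ⟨u, hu, rfl⟩; exact hbound u hu)
    simpa [smul_eq_mul] using this
  have h3lt := pv_three_lt _ hkp
  have hW : pvW lim t = 4 ^ (lim + 1 - (t.1 + t.2.1 + t.2.2)).toNat := rfl
  have := Nat.mul_le_mul_right (4 ^ ((lim + 1 - (t.1 + t.2.1 + t.2.2)).toNat - 4)) hlen
  omega

lemma pvMeasure_append (lim : Int) (u v : List (Int × Int × Int)) :
    pvMeasure lim (u ++ v) = pvMeasure lim u + pvMeasure lim v := by simp [pvMeasure]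

lemma pvMeasure_le_of_forall {lim : Int} (l : List (Int × Int × Int))
    (h : ∀ t ∈ l, Inv_solve t ∧ t.1 + t.2.1 + t.2.2 ≤ lim) :
    pvMeasure lim (l.flatMap fun t => (pvKids t).filter fun k => k.1 + k.2.1 + k.2.2 ≤ lim) ≤
      pvMeasure lim l := by
  induction l with
  | nil => simp [pvMeasure]
  | cons t l' ih =>
    have ht := h t List.mem_cons_self
    have hlt := pv_kidmeasure_lt ht.1 ht.2
    have h2 := ih (fun u hu => h u (List.mem_cons_of_mem _ hu))
    rw [List.flatMap_cons, pvMeasure_append, pvMeasure_cons]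
    omega

lemma pvMeasure_flatMap_lt {lim : Int} (l : List (Int × Int × Int)) (hne : l ≠ [])
    (h : ∀ t ∈ l, Inv_solve t ∧ t.1 + t.2.1 + t.2.2 ≤ lim) :
    pvMeasure lim (l.flatMap fun t => (pvKids t).filter fun k => k.1 + k.2.1 + k.2.2 ≤ lim) <
      pvMeasure lim l := by
  cases l with
  | nil => exact absurd rfl hne
  | cons t l' =>
    have ht := h t List.mem_cons_self
    have hlt := pv_kidmeasure_lt ht.1 ht.2
    have h2 := pvMeasure_le_of_forall l' (fun u hu => h u (List.mem_cons_of_mem _ hu))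
    rw [List.flatMap_cons, pvMeasure_append, pvMeasure_cons]
    omega

-- the per-node count of the subtree rooted at t (0 outside the invariant / limit)
def pvCnt (lim : Int) (t : Int × Int × Int) : Int :=
  if h : 1 ≤ t.1 ∧ t.1 ≤ t.2.1 ∧ t.2.1 ≤ t.2.2 ∧ t.1 + t.2.1 + t.2.2 ≤ lim then
    1 + pvCnt lim (pvSwapA t.1 t.2.1 t.2.2) + pvCnt lim (pvSwapB t.1 t.2.1 t.2.2) +
      (if t.1 ≠ t.2.1 then pvCnt lim (pvSwapC t.1 t.2.1 t.2.2) else 0)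
  else 0
  termination_by (lim + 1 - (t.1 + t.2.1 + t.2.2)).toNat
  decreasing_by
  · have := pv_sumA t.1 t.2.1 t.2.2; omega
  · have := pv_sumB t.1 t.2.1 t.2.2; omega
  · have := pv_sumC t.1 t.2.1 t.2.2; omega

lemma pvCnt_zero {lim : Int} {t : Int × Int × Int} (h : lim < t.1 + t.2.1 + t.2.2) :
    pvCnt lim t = 0 := by
  rw [pvCnt, dif_neg]
  omega

lemma pvCnt_unfold {lim a b c : Int} (h1 : 1 ≤ a) (h2 : a ≤ b) (h3 : b ≤ c) (hle : a + b + c ≤ lim) :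
    pvCnt lim (a, b, c) = 1 + pvCnt lim (pvSwapA a b c) + pvCnt lim (pvSwapB a b c) +
      (if a ≠ b then pvCnt lim (pvSwapC a b c) else 0) := by
  rw [pvCnt]
  dsimp only
  rw [dif_pos ⟨h1, h2, h3, hle⟩]

lemma pv_sum_map_push (lim : Int) (p : Int × Int × Int) (s : List (Int × Int × Int)) :
    ((pvPush lim p s).map (pvCnt lim)).sum = pvCnt lim p + (s.map (pvCnt lim)).sum := by
  unfold pvPush
  split
  · simp
  · rw [pvCnt_zero (by omega)]; omega

lemma solveLoop_eq (lim : Int) (fuel : Nat) (stack : List (Int × Int × Int)) (count : Int)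
    (hs : ∀ t ∈ stack, Inv_solve t) (hf : pvMeasure lim stack < fuel) :
    solveLoop lim fuel stack count = count + (stack.map (pvCnt lim)).sum := by
  induction fuel generalizing stack count with
  | zero => omega
  | succ fuel ih =>
    match stack with
    | [] => rw [solveLoop]; simp
    | (a, b, c) :: rest =>
      have hrest : ∀ t ∈ rest, Inv_solve t := fun t ht => hs t (List.mem_cons_of_mem _ ht)
      have habc : Inv_solve (a, b, c) := hs (a, b, c) List.mem_cons_self
      rw [solveLoop]
      by_cases hgt : a + b + c > lim
      · rw [if_pos hgt, ih rest count hrest (by rw [pvMeasure_cons] at hf; have := pvW_pos lim (a, b, c); omega)]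
        rw [List.map_cons, List.sum_cons, pvCnt_zero (by dsimp only; omega)]
        omega
      · obtain ⟨h1, h2, h3⟩ := pv_inv_mk.mp habc
        rw [if_neg hgt]
        rw [ih _ (count + 1)
          (by
            split
            · exact pvPush_inv (pv_invC habc) (pvPush_inv (pv_invB habc) (pvPush_inv (pv_invA habc) hrest))
            · exact pvPush_inv (pv_invB habc) (pvPush_inv (pv_invA habc) hrest))
          (by have := pv_step_lt lim a b c rest habc (by omega); omega)]
        rw [List.map_cons, List.sum_cons, pvCnt_unfold h1 h2 h3 (by omega)]
        by_cases hab : a = b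
        · rw [if_neg (by simp [hab]), if_neg (by simp [hab]), pv_sum_map_push, pv_sum_map_push]
          omega
        · rw [if_pos hab, if_pos hab, pv_sum_map_push, pv_sum_map_push, pv_sum_map_push]
          omega

lemma pv_swap_eq_minmax (x y z : Int) :
    (if x > y then (y, x, z) else (x, y, z)) = (min x y, max x y, z) := by
  by_cases h : x ≤ y
  · rw [if_neg (by omega), min_eq_left h, max_eq_right h]
  · rw [if_pos (by omega), min_eq_right (by omega), max_eq_left (by omega)]

lemma pv_sum_filter (p : Int × Int × Int → Bool) (f : Int × Int × Int → Int)
    (l : List (Int × Int × Int)) :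
    ((l.filter p).map f).sum = (l.map fun k => if p k = true then f k else 0).sum := by
  induction l with
  | nil => simp
  | cons t l' ih => by_cases hp : p t = true <;> simp [hp, ih]

lemma pv_ite_cnt (lim : Int) (k : Int × Int × Int) :
    (if k.1 + k.2.1 + k.2.2 ≤ lim then pvCnt lim k else 0) = pvCnt lim k := by
  split
  · rfl
  · rw [pvCnt_zero (by omega)]

lemma pvCnt_node {lim : Int} {t : Int × Int × Int}
    (ht : Inv_solve t) (hle : t.1 + t.2.1 + t.2.2 ≤ lim) :
    pvCnt lim t = 1 + (((pvKids t).filter fun k => k.1 + k.2.1 + k.2.2 ≤ lim).map (pvCnt lim)).sum := by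
  obtain ⟨a, b, c⟩ := t
  obtain ⟨h1, h2, h3⟩ := pv_inv_mk.mp ht
  dsimp only at hle
  have eA : pvSwapA a b c =
      (min (a - 2*b + 2*c) (2*a - b + 2*c), max (a - 2*b + 2*c) (2*a - b + 2*c), 2*a - 2*b + 3*c) :=
    pv_swap_eq_minmax _ _ _
  have eB : pvSwapB a b c =
      (min (a + 2*b + 2*c) (2*a + b + 2*c), max (a + 2*b + 2*c) (2*a + b + 2*c), 2*a + 2*b + 3*c) :=
    pv_swap_eq_minmax _ _ _
  have eC : pvSwapC a b c =
      (min (-a + 2*b + 2*c) (-2*a + b + 2*c), max (-a + 2*b + 2*c) (-2*a + b + 2*c), -2*a + 2*b + 3*c) :=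
    pv_swap_eq_minmax _ _ _
  rw [pvCnt_unfold h1 h2 h3 hle, pv_sum_filter, eA, eB, eC]
  rw [List.map_congr_left (fun k _ => by
    simp only [decide_eq_true_eq]
    exact pv_ite_cnt lim k)]
  by_cases hab : a = b <;> simp [pvKids, hab] <;> omega

lemma pv_sum_flatMap (f : Int × Int × Int → List (Int × Int × Int)) (g : Int × Int × Int → Int)
    (l : List (Int × Int × Int)) :
    ((l.flatMap f).map g).sum = (l.map fun t => ((f t).map g).sum).sum := by
  induction l with
  | nil => simp
  | cons t l' ih => simp [List.flatMap_cons, ih]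

lemma pv_sum_one_add (g : Int × Int × Int → Int) (l : List (Int × Int × Int)) :
    (l.map fun t => 1 + g t).sum = (l.length : Int) + (l.map g).sum := by
  induction l with
  | nil => simp
  | cons t l' ih => simp [ih]; ring

lemma bfsLoop_eq (lim : Int) (fuel : Nat) (frontier : List (Int × Int × Int)) (count : Int)
    (h : ∀ t ∈ frontier, Inv_solve t ∧ t.1 + t.2.1 + t.2.2 ≤ lim)
    (hf : pvMeasure lim frontier < fuel) :
    bfsLoop lim fuel frontier count = count + (frontier.map (pvCnt lim)).sum := by
  induction fuel generalizing frontier count with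
  | zero => omega
  | succ fuel ih =>
    rw [bfsLoop]
    by_cases hne : frontier = []
    · rw [if_pos hne, hne]; simp
    · rw [if_neg hne, pv_foldl_step, List.nil_append]
      rw [ih _ (count + (frontier.length : Int))
        (by
          intro u hu
          rcases List.mem_flatMap.mp hu with ⟨t, ht, hu'⟩
          have h1 := List.mem_filter.mp hu'
          exact ⟨pvKids_inv (h t ht).1 h1.1, by simpa using h1.2⟩)
        (by have := pvMeasure_flatMap_lt frontier hne h; omega)]
      rw [pv_sum_flatMap]
      rw [show frontier.map (pvCnt lim) = frontier.map
            (fun t => 1 + (((pvKids t).filter fun k => k.1 + k.2.1 + k.2.2 ≤ lim).map (pvCnt lim)).sum)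
          from List.map_congr_left (fun t ht => pvCnt_node (h t ht).1 (h t ht).2)]
      rw [pv_sum_one_add]
      ring

-- ===== VERDICT (by name: the statement is the Claim_ definition above) =====
theorem solve_spec : Claim_equal_solve := by
  intro limit _
  unfold Spec_solve solve solve_alt
  rw [solveLoop_eq limit _ _ _
        (by
          intro t ht
          rcases List.mem_cons.mp ht with h | h
          · exact h ▸ pv_inv_mk.mpr ⟨by norm_num, by norm_num, by norm_num⟩
          · rcases List.mem_cons.mp h with h' | h'
            · exact h' ▸ pv_inv_mk.mpr ⟨by norm_num, by norm_num, by norm_num⟩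
            · cases h')
        (by omega),
      bfsLoop_eq limit _ _ _
        (by
          intro t ht
          have h1 := List.mem_filter.mp ht
          have h2 : t.1 + t.2.1 + t.2.2 ≤ limit := by simpa using h1.2
          rcases List.mem_cons.mp h1.1 with h | h
          · exact ⟨h ▸ pv_inv_mk.mpr ⟨by norm_num, by norm_num, by norm_num⟩, h2⟩
          · rcases List.mem_cons.mp h with h' | h'
            · exact ⟨h' ▸ pv_inv_mk.mpr ⟨by norm_num, by norm_num, by norm_num⟩, h2⟩
            · cases h')
        (by omega)]
  by_cases h5 : (5:Int) ≤ limit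
  · have h3 : (3:Int) ≤ limit := by omega
    norm_num [h3, h5, List.filter_cons]
    try omega
  · by_cases h3 : (3:Int) ≤ limit
    · norm_num [h3, h5, List.filter_cons]
      try rw [pvCnt_zero (by dsimp only; omega)]
      try omega
    · norm_num [h3, h5, List.filter_cons]
      try rw [pvCnt_zero (by dsimp only; omega), pvCnt_zero (by dsimp only; omega)]
      try omega
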